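-- pv_equiv track=rewrite | github.com/FragileTech/fragile | src/mathster/preprocess_extraction/process_propositions.py | _strip_numbered_prefixes
-- ===== SOURCE A (Python) =====
-- def _strip_numbered_prefixes(text: str | None) -> str | None:
--     """
--     Remove leading 'NNN: ' prefixes that appear at the start of each line
--     in the registry 'content' and 'raw_directive' blobs.
--     """
--     if not text:
--         return text
--     lines = []
--     for ln in text.splitlines():
--         # Remove a leading integer and a colon (e.g., '123: ') if present
--         if ln and ln[0].isdigit():
--             i = 0
--             while i < len(ln) and ln[i].isdigit():
--                 i += 1
--             # expect a colon after digits
--             if i < len(ln) and ln[i] == ":":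
--                 # also remove following single space, if present
--                 j = i + 1
--                 if j < len(ln) and ln[j] == " ":
--                     j += 1
--                 ln = ln[j:]
--         lines.append(ln)
--     return "\n".join(lines)
-- ===== SOURCE B (Python) =====
-- def _strip_numbered_prefixes(text: str | None) -> str | None:
--     """
--     Remove leading 'NNN: ' prefixes that appear at the start of each line
--     in the registry 'content' and 'raw_directive' blobs.
--     """
--     if not text:
--         return text
--     out = []
--     for ln in text.splitlines():
--         parts = ln.split(":", 1)
--         if len(parts) == 2 and parts[0].isdigit():
--             rest = parts[1]
--             if rest.startswith(" "):
--                 rest = rest[1:]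
--             ln = rest
--         out.append(ln)
--     return "\n".join(out)
-- ===== Notes on version B (the rewrite author's own statement) =====
-- stated objective: idiomatic
-- what changed: Replaces the manual character-index while-loop (scan digits, check colon, index arithmetic) with a single split(':', 1) plus str.isdigit() on the left part and startswith(' ') on the remainder.
import Mathlib
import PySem

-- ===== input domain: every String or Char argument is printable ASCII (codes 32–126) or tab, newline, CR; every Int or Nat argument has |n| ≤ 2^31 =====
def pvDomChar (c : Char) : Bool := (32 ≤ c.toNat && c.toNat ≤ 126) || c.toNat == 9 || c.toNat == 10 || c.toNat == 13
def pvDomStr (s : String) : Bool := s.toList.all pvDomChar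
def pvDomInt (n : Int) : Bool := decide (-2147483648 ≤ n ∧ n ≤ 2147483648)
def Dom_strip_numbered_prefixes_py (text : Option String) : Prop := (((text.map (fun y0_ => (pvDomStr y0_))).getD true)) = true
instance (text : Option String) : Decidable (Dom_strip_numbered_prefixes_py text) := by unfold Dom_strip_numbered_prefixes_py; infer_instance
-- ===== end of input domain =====

-- B replaces A's manual index/while-loop digit scan with split(':', 1) + isdigit + startswith
-- (objective: idiomatic; same return value on every input).

-- ===== PORT A =====
-- the `while i < len(ln) and ln[i].isdigit(): i += 1` loop
def pvWhileA (ln : List Char) (i : Nat) : Nat :=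
  if i < ln.length ∧ PySem.Chars.isdigit (ln.getD i ' ') then pvWhileA ln (i + 1) else i
termination_by ln.length - i
decreasing_by omega

-- the body of A's `for ln in text.splitlines()` loop
def pvLineA (ln : List Char) : List Char :=
  if !ln.isEmpty && PySem.Chars.isdigit (ln.headD ' ') then
    let i := pvWhileA ln 0
    if i < ln.length ∧ ln.getD i ' ' = ':' then
      let j := i + 1
      let j := if j < ln.length ∧ ln.getD j ' ' = ' ' then j + 1 else j
      ln.drop j          -- ln[j:] with 0 ≤ j: exactly List.drop
    else ln
  else ln

def strip_numbered_prefixes_py (text : Option String) : Option String :=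
  match text with
  | none => none                               -- `if not text: return text`
  | some s =>
    if s = "" then some s                      -- `if not text: return text`
    else some (String.ofList (PySem.Chars.join ['\n']
      ((PySem.Chars.splitlines s.toList).map pvLineA)))

-- ===== PORT B =====
-- the body of B's loop: parts = ln.split(':', 1); prefix check; startswith(' ')
def pvLineB (ln : List Char) : List Char :=
  let parts := PySem.Chars.splitOnMax ln [':'] 1
  if parts.length = 2 ∧ PySem.Chars.strIsdigit (parts.headD []) then
    let rest := parts.getD 1 []
    if PySem.Chars.startswith rest [' '] then rest.drop 1 else rest  -- rest[1:]
  else ln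

def strip_numbered_prefixes_py_alt (text : Option String) : Option String :=
  match text with
  | none => none                               -- `if not text: return text`
  | some s =>
    if s = "" then some s
    else some (String.ofList (PySem.Chars.join ['\n']
      ((PySem.Chars.splitlines s.toList).map pvLineB)))

-- ===== PRECONDITION & SPEC =====
def Spec_strip_numbered_prefixes_py (text : Option String) (out : Option String) : Prop := out = strip_numbered_prefixes_py_alt text
instance (text : Option String) (out : Option String) : Decidable (Spec_strip_numbered_prefixes_py text out) := by unfold Spec_strip_numbered_prefixes_py; infer_instance

-- ===== CLAIM (what is proved, stated in full; the proofs are below) =====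
def Claim_equal_strip_numbered_prefixes_py : Prop := ∀ (text : Option String), Dom_strip_numbered_prefixes_py text → Spec_strip_numbered_prefixes_py text (strip_numbered_prefixes_py text)

-- ===== LEMMAS AND PROOFS =====

-- split.go with maxsplit budget 0 copies the remainder as the last piece
theorem pv_go_zero (fuel : Nat) (l cur : List Char) (acc : List (List Char)) :
    PySem.Chars.splitOnMax.go [':'] fuel 0 l cur acc = ((cur.reverse ++ l) :: acc).reverse := by
  cases fuel with
  | zero => simp [PySem.Chars.splitOnMax.go]
  | succ f => cases l <;> simp [PySem.Chars.splitOnMax.go]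

-- split.go with budget 1: scan up to the first ':' (if any)
theorem pv_go_one (fuel : Nat) : ∀ (cs cur : List Char) (acc : List (List Char)),
    cs.length < fuel →
    PySem.Chars.splitOnMax.go [':'] fuel 1 cs cur acc =
      if ':' ∈ cs then
        acc.reverse ++ [cur.reverse ++ cs.takeWhile (· ≠ ':'), (cs.dropWhile (· ≠ ':')).tail]
      else acc.reverse ++ [cur.reverse ++ cs] := by
  induction fuel with
  | zero => intro cs cur acc h; omega
  | succ f ih =>
    intro cs cur acc h
    cases cs with
    | nil => simp [PySem.Chars.splitOnMax.go]
    | cons c rest =>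
      by_cases hc : c = ':'
      · subst hc
        simp [PySem.Chars.splitOnMax.go, List.isPrefixOf, pv_go_zero]
      · have hpre : ¬ ([':'].isPrefixOf (c :: rest)) := by
          simp [List.isPrefixOf]; exact fun h' => hc h'.symm
        simp only [PySem.Chars.splitOnMax.go]
        rw [if_neg (by simp), if_neg (by simpa using hpre)]
        rw [ih rest (c :: cur) acc (by simpa using Nat.lt_of_succ_lt_succ h)]
        have hc' : ¬ (':' = c) := fun h' => hc h'.symm
        simp [List.takeWhile, List.dropWhile, hc, hc']

theorem pv_splitOnMax_colon (cs : List Char) :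
    PySem.Chars.splitOnMax cs [':'] 1 =
      if ':' ∈ cs then [cs.takeWhile (· ≠ ':'), (cs.dropWhile (· ≠ ':')).tail]
      else [cs] := by
  rw [PySem.Chars.splitOnMax]
  rw [if_neg (by norm_num)]
  rw [show (1 : Int).toNat = 1 from rfl]
  rw [pv_go_one (cs.length + 1) cs [] [] (by omega)]
  split <;> simp

theorem pvWhileA_spec (cs : List Char) : ∀ i, i ≤ cs.length →
    pvWhileA cs i = i + ((cs.drop i).takeWhile PySem.Chars.isdigit).length := by
  intro i
  induction hn : cs.length - i using Nat.strong_induction_on generalizing i with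
  | _ n ih =>
    intro hi
    rw [pvWhileA]
    by_cases h : i < cs.length ∧ PySem.Chars.isdigit (cs.getD i ' ')
    · rw [if_pos h]
      obtain ⟨h1, h2⟩ := h
      rw [List.getD_eq_getElem _ _ h1] at h2
      rw [ih (cs.length - (i + 1)) (by omega) (i + 1) rfl (by omega)]
      rw [List.drop_eq_getElem_cons h1]
      rw [List.takeWhile_cons_of_pos h2]
      simp; omega
    · rw [if_neg h]
      rcases Nat.lt_or_ge i cs.length with hlt | hge
      · have h2 : ¬ PySem.Chars.isdigit cs[i] := by
          intro hd; exact h ⟨hlt, by rw [List.getD_eq_getElem _ _ hlt]; exact hd⟩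
        rw [List.drop_eq_getElem_cons hlt, List.takeWhile_cons_of_neg (by simpa using h2)]
        simp
      · have : cs.drop i = [] := List.drop_eq_nil_of_le hge
        simp [this]

-- the first element surviving dropWhile fails the predicate
theorem pv_dropWhile_head (p : Char → Bool) : ∀ (l u : List Char) (d : Char), l.dropWhile p = d :: u → p d = false := by
  intro l
  induction l with
  | nil => intro u d h; simp [List.dropWhile] at h
  | cons c cs ih =>
    intro u d h
    by_cases hp : p c
    · rw [List.dropWhile_cons_of_pos hp] at h; exact ih u d h
    · rw [List.dropWhile_cons_of_neg hp] at h
      cases h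
      simpa using hp

theorem pv_getD_append_right (t u : List Char) (k : Nat) (d : Char) (hk : k < u.length) :
    (t ++ u).getD (t.length + k) d = u.getD k d := by
  rw [List.getD_eq_getElem _ _ (by simp; omega), List.getD_eq_getElem _ _ hk]
  rw [List.getElem_append_right (by omega)]
  congr 1
  omega

theorem pv_getD_append_left (t u : List Char) (k : Nat) (d : Char) (hk : k < t.length) :
    (t ++ u).getD k d = t.getD k d := by
  rw [List.getD_eq_getElem _ _ (by simp; omega), List.getD_eq_getElem _ _ hk]
  exact List.getElem_append_left hk

-- every char of takeWhile (· ≠ ':') is ≠ ':'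
theorem pv_mem_take_ne (cs : List Char) {c : Char} (h : c ∈ cs.takeWhile (· ≠ ':')) : c ≠ ':' := by
  have := List.mem_takeWhile_imp h
  simpa using this

theorem pv_line_eq (ln : List Char) : pvLineA ln = pvLineB ln := by
  by_cases hmem : ':' ∈ ln
  · -- ln = t ++ ':' :: u
    set t := ln.takeWhile (· ≠ ':') with ht
    have hdrop : ln.dropWhile (· ≠ ':') ≠ [] := by
      rw [Ne, List.dropWhile_eq_nil_iff]
      intro hforall
      exact absurd (hforall ':' hmem) (by simp)
    obtain ⟨d, u, hdu⟩ : ∃ d u, ln.dropWhile (· ≠ ':') = d :: u :=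
      List.exists_cons_of_ne_nil hdrop
    have hd : d = ':' := by
      have := pv_dropWhile_head _ ln u d hdu
      simpa using this
    subst hd
    have hln : ln = t ++ ':' :: u := by
      conv_lhs => rw [← List.takeWhile_append_dropWhile (p := (· ≠ ':')) (l := ln)]
      rw [← ht, hdu]
    have hB : PySem.Chars.splitOnMax ln [':'] 1 = [t, u] := by
      rw [pv_splitOnMax_colon, if_pos hmem, ← ht, hdu]
      simp
    by_cases hdig : PySem.Chars.strIsdigit t
    · -- the prefix before the first ':' is a nonempty digit string: both strip it
      have htne : t ≠ [] := by
        intro h0; rw [h0] at hdig; simp [PySem.Chars.strIsdigit] at hdig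
      have hall : ∀ c ∈ t, PySem.Chars.isdigit c := by
        intro c hc
        have := hdig; rw [PySem.Chars.strIsdigit] at this
        simp only [Bool.and_eq_true, List.all_eq_true] at this
        exact this.2 c hc
      -- A's digit scan stops exactly at |t|
      have htake : ln.takeWhile PySem.Chars.isdigit = t := by
        rw [hln, List.takeWhile_append_of_pos ?_]
        · simp [List.takeWhile_cons_of_neg, PySem.Chars.isdigit]
        · intro c hc; exact hall c hc
      have hwhile : pvWhileA ln 0 = t.length := by
        rw [pvWhileA_spec ln 0 (by omega)]; simp [htake]
      have hlen : ln.length = t.length + 1 + u.length := by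
        rw [hln]; simp; omega
      obtain ⟨c, t', hct⟩ := List.exists_cons_of_ne_nil htne
      have hhead : PySem.Chars.isdigit (ln.headD ' ') := by
        rw [hln, hct]
        simp only [List.cons_append, List.headD_cons]
        exact hall c (by rw [hct]; simp)
      have hA1 : pvLineA ln = ln.drop (if t.length + 1 < ln.length ∧ ln.getD (t.length + 1) ' ' = ' ' then t.length + 2 else t.length + 1) := by
        rw [pvLineA]
        rw [if_pos (by
          simp only [Bool.and_eq_true, Bool.not_eq_true', List.isEmpty_eq_false_iff]
          exact ⟨by rw [hln]; simp, hhead⟩)]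
        simp only [hwhile]
        rw [if_pos (by
          refine ⟨by omega, ?_⟩
          rw [hln]
          simpa using pv_getD_append_right t (':' :: u) 0 ' ' (by simp))]
      have hgetu : ∀ k, ln.drop (t.length + 1 + k) = u.drop k := by
        intro k; rw [hln, ← List.drop_drop, ← List.drop_drop]
        rw [List.drop_append_of_le_length (by omega), List.drop_length]
        simp
      rw [pvLineB, hB]
      rw [if_pos (by exact ⟨rfl, by simpa using hdig⟩)]
      simp only [List.getD_cons_succ, List.getD_cons_zero]
      by_cases hu : PySem.Chars.startswith u [' ']
      · have : ∃ u', u = ' ' :: u' := by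
          rcases (PySem.Chars.startswith_iff u [' ']).mp hu with ⟨r, hr⟩
          exact ⟨r, hr.symm⟩
        obtain ⟨u', rfl⟩ := this
        rw [if_pos hu, hA1, if_pos ?_]
        · have := hgetu 1; simpa [Nat.add_assoc] using this
        · constructor
          · rw [hln]; simp only [List.length_append, List.length_cons]; omega
          · rw [hln]
            simpa using pv_getD_append_right t (':' :: ' ' :: u') 1 ' ' (by simp)
      · have hune : ¬ (t.length + 1 < ln.length ∧ ln.getD (t.length + 1) ' ' = ' ') := by
          rintro ⟨h1, h2⟩
          apply hu
          have hu1 : u ≠ [] := by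
            intro h0; rw [h0] at hlen; simp at hlen; omega
          obtain ⟨c, u', rfl⟩ := List.exists_cons_of_ne_nil hu1
          have : ln.getD (t.length + 1) ' ' = c := by
            rw [hln]
            simpa using pv_getD_append_right t (':' :: c :: u') 1 ' ' (by simp)
          rw [this] at h2
          subst h2
          rw [PySem.Chars.startswith_iff]
          exact ⟨u', rfl⟩
        rw [if_neg hu, hA1, if_neg hune]
        have := hgetu 0; simpa using this
    · -- prefix before ':' not a nonempty digit run: both keep the line
      rw [pvLineB, hB, if_neg (by rintro ⟨-, h2⟩; exact hdig (by simpa using h2))]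
      rw [pvLineA]
      by_cases hg : !ln.isEmpty && PySem.Chars.isdigit (ln.headD ' ')
      · rw [if_pos hg]
        simp only [Bool.and_eq_true, Bool.not_eq_true', List.isEmpty_eq_false_iff] at hg
        obtain ⟨hne, hhd⟩ := hg
        -- head is a digit hence ≠ ':', so t ≠ []
        obtain ⟨c, ln', rfl⟩ := List.exists_cons_of_ne_nil hne
        have hc : c ≠ ':' := by
          intro h0; rw [h0] at hhd; simp [PySem.Chars.isdigit] at hhd
        have htcons : t = c :: ln'.takeWhile (· ≠ ':') := by
          rw [ht, List.takeWhile_cons_of_pos (by simpa using hc)]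
        -- digit run = takeWhile isdigit of t, strictly shorter than t
        have hsub : (c :: ln').takeWhile PySem.Chars.isdigit = t.takeWhile PySem.Chars.isdigit := by
          rw [ht, List.takeWhile_takeWhile]
          congr 1
          funext a
          by_cases ha : PySem.Chars.isdigit a
          · have : a ≠ ':' := by
              intro h0; rw [h0] at ha; simp [PySem.Chars.isdigit] at ha
            simp [ha, this]
          · simp [ha]
        have hlt : ((c :: ln').takeWhile PySem.Chars.isdigit).length < t.length := by
          rw [hsub]
          rcases Nat.lt_or_ge (t.takeWhile PySem.Chars.isdigit).length t.length with h | h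
          · exact h
          · exfalso
            have heq : t.takeWhile PySem.Chars.isdigit = t :=
              List.IsPrefix.eq_of_length_le (List.takeWhile_prefix _) h
            apply hdig
            rw [PySem.Chars.strIsdigit]
            have : t ≠ [] := by rw [htcons]; simp
            simp only [Bool.and_eq_true, List.all_eq_true]
            refine ⟨by simpa using this, ?_⟩
            intro a ha
            have := List.takeWhile_eq_self_iff.mp heq  -- may not exist; fallback below
            exact this a ha
        have hwhile : pvWhileA (c :: ln') 0 = ((c :: ln').takeWhile PySem.Chars.isdigit).length := by
          rw [pvWhileA_spec _ 0 (by omega)]; simp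
        simp only [hwhile]
        rw [if_neg ?_]
        rintro ⟨h1, h2⟩
        set k := ((c :: ln').takeWhile PySem.Chars.isdigit).length with hk
        have hkt : (c :: ln').getD k ' ' = t.getD k ' ' := by
          rw [hln]
          exact pv_getD_append_left t (':' :: u) k ' ' (by omega)
        rw [hkt] at h2
        have : t.getD k ' ' ∈ t := by
          rw [List.getD_eq_getElem _ _ (by omega)]
          exact List.getElem_mem _
        have hne2 := pv_mem_take_ne (c :: ln') (by rw [← ht]; exact this)
        exact hne2 h2
      · rw [if_neg hg]
  · -- no ':' in the line: both keep it
    rw [pvLineB, pv_splitOnMax_colon, if_neg hmem]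
    rw [if_neg (by simp)]
    rw [pvLineA]
    by_cases hg : !ln.isEmpty && PySem.Chars.isdigit (ln.headD ' ')
    · rw [if_pos hg]
      have hwhile : pvWhileA ln 0 = (ln.takeWhile PySem.Chars.isdigit).length := by
        rw [pvWhileA_spec _ 0 (by omega)]; simp
      simp only [hwhile]
      rw [if_neg ?_]
      rintro ⟨h1, h2⟩
      apply hmem
      rw [← h2]
      rw [List.getD_eq_getElem _ _ h1]
      exact List.getElem_mem _
    · rw [if_neg hg]

-- ===== VERDICT (by name: the statement is the Claim_ definition above) =====
theorem strip_numbered_prefixes_py_spec : Claim_equal_strip_numbered_prefixes_py := by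
  intro text _
  unfold Spec_strip_numbered_prefixes_py strip_numbered_prefixes_py strip_numbered_prefixes_py_alt
  match text with
  | none => rfl
  | some s =>
    by_cases hs : s = "" <;> simp [hs, funext pv_line_eq]
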